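-- pv_equiv track=rewrite | github.com/mpillar/hackerrank | domains/python/collections/piling-up/main.py | is_stackable
-- ===== SOURCE A (Python) =====
-- def is_stackable(side_lengths):
--     current_top_of_stack = max(side_lengths[0], side_lengths[-1])
--     while len(side_lengths) > 1:
--         # Choose the larger of both sides.
--         if side_lengths[0] > side_lengths[-1]:
--             next_top_of_stack = side_lengths[0]
--             del side_lengths[0]
--         else:
--             next_top_of_stack = side_lengths[-1]
--             del side_lengths[-1]
--         if next_top_of_stack > current_top_of_stack:
--             return False
--         current_top_of_stack = next_top_of_stack
--     return True
-- ===== SOURCE B (Python) =====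
-- def is_stackable(side_lengths):
--     i, j = 0, len(side_lengths) - 1
--     current_top_of_stack = max(side_lengths[i], side_lengths[j])
--     while i < j:
--         if side_lengths[i] > side_lengths[j]:
--             next_top_of_stack = side_lengths[i]
--             i += 1
--         else:
--             next_top_of_stack = side_lengths[j]
--             j -= 1
--         if next_top_of_stack > current_top_of_stack:
--             return False
--         current_top_of_stack = next_top_of_stack
--     return True
-- ===== Notes on version B (the rewrite author's own statement) =====
-- stated objective: alternative
-- what changed: Two-pointer scan over both ends of the unmodified list replaces A's loop that repeatedly deletes an end element; B also leaves the caller's list unmutated where A destroys it.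
import Mathlib
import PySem

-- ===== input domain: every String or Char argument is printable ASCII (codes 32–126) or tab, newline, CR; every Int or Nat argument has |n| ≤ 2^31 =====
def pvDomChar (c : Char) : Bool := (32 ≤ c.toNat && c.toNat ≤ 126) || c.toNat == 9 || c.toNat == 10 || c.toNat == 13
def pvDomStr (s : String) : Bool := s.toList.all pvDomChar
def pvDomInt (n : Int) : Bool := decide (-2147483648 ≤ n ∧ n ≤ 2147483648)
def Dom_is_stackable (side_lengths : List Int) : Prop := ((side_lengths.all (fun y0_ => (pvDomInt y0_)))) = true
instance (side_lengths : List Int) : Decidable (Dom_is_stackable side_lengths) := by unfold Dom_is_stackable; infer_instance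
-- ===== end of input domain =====

-- ===== PORT A =====
-- B changes the algorithm (two pointers, no deletions); A mutates its argument in Python
-- (del from both ends) — the equivalence proved here is about the RETURN value only.
-- Loop of A: while len(side_lengths) > 1, pop the larger end; exact on nonempty lists (Pre_).
def isStackableLoop (xs : List Int) (current_top_of_stack : Int) : Bool :=
  if _h : xs.length > 1 then
    if xs.headI > xs.getLastI then
      let next_top_of_stack := xs.headI
      if next_top_of_stack > current_top_of_stack then false
      else isStackableLoop xs.tail next_top_of_stack
    else
      let next_top_of_stack := xs.getLastI
      if next_top_of_stack > current_top_of_stack then false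
      else isStackableLoop xs.dropLast next_top_of_stack
  else true
termination_by xs.length
decreasing_by
  · simp [List.length_tail]; omega
  · simp [List.length_dropLast]; omega

def is_stackable (side_lengths : List Int) : Bool :=
  -- side_lengths[0], side_lengths[-1]: in range on every input Pre_ admits (nonempty list)
  isStackableLoop side_lengths (max side_lengths.headI side_lengths.getLastI)

-- ===== PORT B =====
-- while i < j of Source B; indices stay in range (0 ≤ i < j < length), so getD is exact
def isStackableAltLoop (xs : List Int) (i j : Nat) (current_top_of_stack : Int) : Bool :=
  if i < j then
    if xs.getD i 0 > xs.getD j 0 then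
      let next_top_of_stack := xs.getD i 0
      if next_top_of_stack > current_top_of_stack then false
      else isStackableAltLoop xs (i + 1) j next_top_of_stack
    else
      let next_top_of_stack := xs.getD j 0
      if next_top_of_stack > current_top_of_stack then false
      else isStackableAltLoop xs i (j - 1) next_top_of_stack
  else true
termination_by j - i

def is_stackable_alt (side_lengths : List Int) : Bool :=
  let i := 0
  let j := side_lengths.length - 1
  isStackableAltLoop side_lengths i j (max (side_lengths.getD i 0) (side_lengths.getD j 0))

-- ===== PRECONDITION & SPEC =====
-- Pre_ excludes only the empty list, on which Python A raises IndexError at side_lengths[0].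
def Pre_is_stackable (side_lengths : List Int) : Prop := side_lengths ≠ []
instance (side_lengths : List Int) : Decidable (Pre_is_stackable side_lengths) := by unfold Pre_is_stackable; infer_instance
def pvWitness_is_stackable : List Int := [1, 2, 3, 2, 1]
def Spec_is_stackable (side_lengths : List Int) (out : Bool) : Prop := out = is_stackable_alt side_lengths
instance (side_lengths : List Int) (out : Bool) : Decidable (Spec_is_stackable side_lengths out) := by unfold Spec_is_stackable; infer_instance

-- ===== CLAIM (what is proved, stated in full; the proofs are below) =====
def Claim_equal_is_stackable : Prop := ∀ (side_lengths : List Int), Dom_is_stackable side_lengths → Pre_is_stackable side_lengths → Spec_is_stackable side_lengths (is_stackable side_lengths)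

-- ===== LEMMAS AND PROOFS =====

theorem headI_getD_int (l : List Int) : l.headI = l.head?.getD 0 := by
  cases l <;> simp [List.headI]

theorem take_tail_int (l : List Int) (n : Nat) : (l.take n).tail = l.tail.take (n - 1) := by
  cases l <;> cases n <;> simp

theorem getLastI_getD_int (l : List Int) : l.getLastI = l.getD (l.length - 1) 0 := by
  rw [List.getLastI_eq_getLast?_getD, List.getLast?_eq_getElem?, List.getD_eq_getElem?_getD]
  rfl

theorem seg_headI (xs : List Int) (i j : Nat) (_hj : j < xs.length) :
    ((xs.drop i).take (j - i + 1)).headI = xs.getD i 0 := by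
  rw [headI_getD_int, List.head?_take, List.head?_drop]
  simp [List.getD_eq_getElem?_getD]

theorem seg_getLastI (xs : List Int) (i j : Nat) (h : i ≤ j) (hj : j < xs.length) :
    ((xs.drop i).take (j - i + 1)).getLastI = xs.getD j 0 := by
  have hl : ((xs.drop i).take (j - i + 1)).length = j - i + 1 := by simp; omega
  rw [List.getLastI_eq_getLast?_getD, List.getLast?_eq_getElem?, hl]
  simp only [Nat.add_sub_cancel]
  rw [List.getElem?_take_of_lt (by omega), List.getElem?_drop]
  have hij : i + (j - i) = j := by omega
  rw [hij, List.getD_eq_getElem?_getD]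
  rfl

theorem seg_tail (xs : List Int) (i j : Nat) (h : i < j) :
    ((xs.drop i).take (j - i + 1)).tail = (xs.drop (i + 1)).take (j - (i + 1) + 1) := by
  rw [take_tail_int, List.tail_drop]
  congr 1
  omega

theorem seg_dropLast (xs : List Int) (i j : Nat) (h : i < j) (hj : j < xs.length) :
    ((xs.drop i).take (j - i + 1)).dropLast = (xs.drop i).take (j - 1 - i + 1) := by
  rw [List.dropLast_eq_take, List.take_take, List.length_take, List.length_drop]
  have hm : min (min (j - i + 1) (xs.length - i) - 1) (j - i + 1) = j - 1 - i + 1 := by omega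
  rw [hm]

theorem loops_agree (n : Nat) : ∀ (xs : List Int) (i j : Nat) (cur : Int),
    i ≤ j → j < xs.length → j - i ≤ n →
    isStackableAltLoop xs i j cur = isStackableLoop ((xs.drop i).take (j - i + 1)) cur := by
  induction n with
  | zero =>
    intro xs i j cur h hj hn
    have hij : ¬ i < j := by omega
    have hl : ((xs.drop i).take (j - i + 1)).length = j - i + 1 := by simp; omega
    rw [isStackableAltLoop, isStackableLoop]
    simp [hij, hl]
  | succ n ih =>
    intro xs i j cur h hj hn
    by_cases hij : i < j
    · have hl : ((xs.drop i).take (j - i + 1)).length = j - i + 1 := by simp; omega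
      rw [isStackableAltLoop, isStackableLoop]
      rw [seg_headI xs i j hj, seg_getLastI xs i j h hj]
      simp only [hij, if_true, hl]
      rw [dif_pos (by omega)]
      by_cases hcmp : xs.getD i 0 > xs.getD j 0
      · simp only [hcmp, if_true]
        rw [ih xs (i + 1) j _ (by omega) hj (by omega), seg_tail xs i j hij]
      · simp only [hcmp, if_false]
        rw [ih xs i (j - 1) _ (by omega) (by omega) (by omega), seg_dropLast xs i j hij hj]
    · have hl : ((xs.drop i).take (j - i + 1)).length = j - i + 1 := by simp; omega
      rw [isStackableAltLoop, isStackableLoop]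
      simp [hij, hl]

-- ===== VERDICT (by name: the statement is the Claim_ definition above) =====
theorem is_stackable_spec : Claim_equal_is_stackable := by
  intro xs _hdom hpre
  unfold Spec_is_stackable is_stackable is_stackable_alt
  have hlen : 1 ≤ xs.length := by
    cases xs with
    | nil => exact absurd rfl hpre
    | cons a t => simp
  rw [loops_agree xs.length xs 0 (xs.length - 1) _ (by omega) (by omega) (by omega)]
  have hseg : (xs.drop 0).take (xs.length - 1 - 0 + 1) = xs := by
    rw [List.drop_zero]
    have : xs.length - 1 - 0 + 1 = xs.length := by omega
    rw [this, List.take_length]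
  rw [hseg, headI_getD_int, getLastI_getD_int]
  rw [List.getD_eq_getElem?_getD, List.head?_eq_getElem?, List.getD_eq_getElem?_getD]
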